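-- pv_equiv track=rewrite | github.com/Adrellan/Scriptnyelvek | csodalatos_elme.py | fordito
-- ===== SOURCE A (Python) =====
-- def fordito(str):
--     szotar={'3': 'E', '4':'A', '7':'T', '5':'S', '0':'O', '1':'I'}
--     forditott=""
--     for c in str:
--         for n in szotar:
--             if(c==n):
--                 forditott+=(szotar[n])
--                 break
--             elif(n=='1'):
--                 forditott+=c
--                 break
--
--     return forditott
-- ===== SOURCE B (Python) =====
-- def fordito(str):
--     return (str.replace('3', 'E').replace('4', 'A').replace('7', 'T')
--                .replace('5', 'S').replace('0', 'O').replace('1', 'I'))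
-- ===== Notes on version B (the rewrite author's own statement) =====
-- stated objective: idiomatic
-- what changed: Replaces A's per-character pass with a nested break-driven scan over the dict keys by a chain of six whole-string str.replace calls, one per leet digit; safe because every replacement output is a letter that is never a key.
import Mathlib
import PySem

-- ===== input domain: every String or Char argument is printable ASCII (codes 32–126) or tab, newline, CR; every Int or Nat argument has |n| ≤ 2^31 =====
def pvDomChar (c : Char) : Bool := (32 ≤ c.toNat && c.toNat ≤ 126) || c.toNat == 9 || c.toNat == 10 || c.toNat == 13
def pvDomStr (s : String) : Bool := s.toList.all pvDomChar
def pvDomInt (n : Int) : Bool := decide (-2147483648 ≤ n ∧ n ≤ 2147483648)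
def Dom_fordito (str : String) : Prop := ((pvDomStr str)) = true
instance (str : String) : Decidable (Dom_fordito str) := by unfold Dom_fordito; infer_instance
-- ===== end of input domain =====

-- B replaces A's per-character scan over the dict keys with a chain of six
-- whole-string str.replace calls (idiomatic; same cost).


-- ===== PORT A =====
-- the dict szotar (characters as keys/values since Python iterates one-char strings)
def forditoSzotar : PySem.Dict Char String :=
  ((((((PySem.Dict.empty.insert '3' "E").insert '4' "A").insert '7' "T").insert
      '5' "S").insert '0' "O").insert '1' "I")

-- the inner 'for n in szotar' loop with its two breaks; returns the updated forditott.
-- szotar[n] is ported as get? with getD "" — in A the key n is always present in szotar.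
def forditoInner (szotar : PySem.Dict Char String) (forditott : String) (c : Char) :
    List Char → String
  | [] => forditott
  | n :: rest =>
    if c == n then forditott ++ ((szotar.get? n).getD "")
    else if n == '1' then forditott ++ String.singleton c
    else forditoInner szotar forditott c rest

def fordito (str : String) : String :=
  let szotar := forditoSzotar
  str.toList.foldl (fun forditott c => forditoInner szotar forditott c szotar.keys) ""

-- ===== PORT B =====
def fordito_alt (str : String) : String :=
  PySem.Str.replace (PySem.Str.replace (PySem.Str.replace (PySem.Str.replace
    (PySem.Str.replace (PySem.Str.replace str "3" "E") "4" "A") "7" "T")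
    "5" "S") "0" "O") "1" "I"

-- ===== PRECONDITION & SPEC =====
def Spec_fordito (str : String) (out : String) : Prop := out = fordito_alt str
instance (str : String) (out : String) : Decidable (Spec_fordito str out) := by unfold Spec_fordito; infer_instance

-- ===== CLAIM (what is proved, stated in full; the proofs are below) =====
def Claim_equal_fordito : Prop := ∀ (str : String), Dom_fordito str → Spec_fordito str (fordito str)

-- ===== LEMMAS AND PROOFS =====

/-- the common per-character translation both programs compute -/
def leet (c : Char) : Char :=
  if c = '3' then 'E' else if c = '4' then 'A' else if c = '7' then 'T'
  else if c = '5' then 'S' else if c = '0' then 'O' else if c = '1' then 'I' else c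

/-- single-character substitution via one `replace` step -/
def sub1 (o n c : Char) : Char := if c = o then n else c

lemma replace_go_single (o n : Char) :
    ∀ (fuel : Nat) (l acc : List Char), l.length ≤ fuel →
      PySem.Chars.replace.go [o] [n] fuel l acc =
        acc.reverse ++ l.map (sub1 o n) := by
  intro fuel
  induction fuel with
  | zero =>
    intro l acc h
    have : l = [] := List.eq_nil_of_length_eq_zero (Nat.le_zero.mp h)
    subst this; simp [PySem.Chars.replace.go]
  | succ fuel ih =>
    intro l acc h
    cases l with
    | nil => simp [PySem.Chars.replace.go]
    | cons c t =>
      simp only [PySem.Chars.replace.go]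
      by_cases hc : c = o
      · subst hc
        have : [c].isPrefixOf (c :: t) = true := by simp [List.isPrefixOf]
        rw [if_pos this]
        simp only [List.length_cons, List.length_nil, Nat.zero_add, List.drop_succ_cons,
          List.drop_zero]
        rw [ih t _ (by simpa using Nat.le_of_succ_le_succ h)]
        simp [sub1]
      · have : [o].isPrefixOf (c :: t) = false := by
          simp [List.isPrefixOf]; exact fun h' => (hc h'.symm).elim
        rw [if_neg (by simp [this])]
        rw [ih t _ (by simpa using Nat.le_of_succ_le_succ h)]
        simp [sub1, hc]

lemma replace_single (o n : Char) (s : List Char) :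
    PySem.Chars.replace s [o] [n] = s.map (sub1 o n) := by
  rw [PySem.Chars.replace]
  simp only [List.isEmpty_cons]
  exact replace_go_single o n s.length s [] le_rfl

lemma fordito_alt_toList (str : String) :
    (fordito_alt str).toList = str.toList.map leet := by
  simp only [fordito_alt, PySem.Str.toList_replace,
    show "3".toList = ['3'] from rfl, show "E".toList = ['E'] from rfl,
    show "4".toList = ['4'] from rfl, show "A".toList = ['A'] from rfl,
    show "7".toList = ['7'] from rfl, show "T".toList = ['T'] from rfl,
    show "5".toList = ['5'] from rfl, show "S".toList = ['S'] from rfl,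
    show "0".toList = ['0'] from rfl, show "O".toList = ['O'] from rfl,
    show "1".toList = ['1'] from rfl, show "I".toList = ['I'] from rfl,
    replace_single, List.map_map]
  apply List.map_congr_left
  intro c _
  simp only [Function.comp, sub1, leet]
  split_ifs <;> simp_all

lemma forditoInner_toList (s : String) (c : Char) :
    (forditoInner forditoSzotar s c forditoSzotar.keys).toList
      = s.toList ++ [leet c] := by
  have hk : forditoSzotar.keys = ['3', '4', '7', '5', '0', '1'] := by rfl
  rw [hk]
  by_cases h3 : c = '3'
  · subst h3; simp [forditoInner, leet]; decide
  by_cases h4 : c = '4'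
  · subst h4; simp [forditoInner, leet]; decide
  by_cases h7 : c = '7'
  · subst h7; simp [forditoInner, leet]; decide
  by_cases h5 : c = '5'
  · subst h5; simp [forditoInner, leet]; decide
  by_cases h0 : c = '0'
  · subst h0; simp [forditoInner, leet]; decide
  by_cases h1 : c = '1'
  · subst h1; simp [forditoInner, leet]; decide
  · simp [forditoInner, h3, h4, h7, h5, h0, h1, leet, String.singleton]

lemma fordito_foldl (l : List Char) : ∀ (s : String),
    (l.foldl (fun forditott c =>
        forditoInner forditoSzotar forditott c forditoSzotar.keys) s).toList
      = s.toList ++ l.map leet := by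
  induction l with
  | nil => intro s; simp
  | cons c t ih =>
    intro s
    simp only [List.foldl_cons, List.map_cons]
    rw [ih, forditoInner_toList]
    simp

lemma fordito_toList (str : String) :
    (fordito str).toList = str.toList.map leet := by
  simpa using fordito_foldl str.toList ""

-- ===== VERDICT (by name: the statement is the Claim_ definition above) =====
theorem fordito_spec : Claim_equal_fordito := by
  intro str _
  show fordito str = fordito_alt str
  have h : (fordito str).toList = (fordito_alt str).toList := by
    rw [fordito_toList, fordito_alt_toList]
  exact String.toList_injective h
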